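-- pv_equiv track=rewrite | github.com/pujin2/LING402 | HW8/b.py | find_gra
-- ===== SOURCE A (Python) =====
-- graphemes = ['c', 'ngngw', 'ngng', 'ghhw', 'ngw', 'ghh', 'ghw', 'nn', 'mm', 'wh', 'gg', 'rr', 'll', 'gh', 'qw', 'kw', 'ng', 'n', 'm', 'h', 's', 'f', 'w', 'g', 'r', 'y', 'z', 'l', 'v', 'q', 'k', 't', 'p', 'i', 'a', 'e', 'u' ]
--
-- def  find_gra (check):
-- 	lgra = []
-- 	if check.startswith("'") or check.startswith("’"):
-- 		check = check[1:]       #remove '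
-- 	if len(check)<1:
-- 		return lgra     #base case
-- 	for g in graphemes:     #recursion case
-- 		if len(g)<=len(check) and check.startswith(g):
-- 			lgra.append(g)
-- 			check = check[len(g):len(check)]
-- 			lgra.extend(find_gra(check))
-- 			break
-- 	return lgra
-- ===== SOURCE B (Python) =====
-- graphemes = ['c', 'ngngw', 'ngng', 'ghhw', 'ngw', 'ghh', 'ghw', 'nn', 'mm', 'wh', 'gg', 'rr', 'll', 'gh', 'qw', 'kw', 'ng', 'n', 'm', 'h', 's', 'f', 'w', 'g', 'r', 'y', 'z', 'l', 'v', 'q', 'k', 't', 'p', 'i', 'a', 'e', 'u' ]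
--
-- def find_gra(check):
--     lgra = []
--     while True:
--         if check.startswith("'") or check.startswith("’"):
--             check = check[1:]
--         if not check:
--             return lgra
--         for g in graphemes:
--             if check.startswith(g):
--                 lgra.append(g)
--                 check = check[len(g):]
--                 break
--         else:
--             return lgra
-- ===== Notes on version B (the rewrite author's own statement) =====
-- stated objective: simpler
-- what changed: Replaces A's recursion (each call strips a quote, finds the first matching grapheme, recurses on the rest and concatenates) with a single while-True loop that maintains the accumulator list lgra and shortens check in place, returning lgra when check empties or no grapheme matches.
import Mathlib
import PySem

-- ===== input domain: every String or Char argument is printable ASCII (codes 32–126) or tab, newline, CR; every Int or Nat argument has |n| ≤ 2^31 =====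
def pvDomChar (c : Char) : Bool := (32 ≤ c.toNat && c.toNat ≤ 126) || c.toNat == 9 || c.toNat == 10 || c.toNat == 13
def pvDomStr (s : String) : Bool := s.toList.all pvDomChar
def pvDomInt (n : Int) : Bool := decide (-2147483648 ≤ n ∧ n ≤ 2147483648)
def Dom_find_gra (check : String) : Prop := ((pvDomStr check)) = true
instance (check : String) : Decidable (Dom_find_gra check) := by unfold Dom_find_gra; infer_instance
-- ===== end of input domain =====

-- B rewrites A's recursion as an explicit loop with an accumulator (same greedy first-match scan, tail-recursive decomposition); objective: simpler, no speed claim.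

-- the module-level list `graphemes`
def pvGraphemes : List String := ["c", "ngngw", "ngng", "ghhw", "ngw", "ghh", "ghw", "nn", "mm", "wh", "gg", "rr", "ll", "gh", "qw", "kw", "ng", "n", "m", "h", "s", "f", "w", "g", "r", "y", "z", "l", "v", "q", "k", "t", "p", "i", "a", "e", "u"]

-- every grapheme is nonempty (used for the termination of both ports)
theorem pvGraphemes_ne_nil : ∀ g ∈ pvGraphemes, g.toList ≠ [] := by decide

-- if find? succeeds the found element satisfies the predicate and is a member (termination helper)
theorem pv_find_decrease {g : String} {c : List Char}
    (h : pvGraphemes.find? (fun g => decide (g.toList.length ≤ c.length) && g.toList.isPrefixOf c) = some g)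
    (hc : c ≠ []) : (c.drop g.toList.length).length < c.length := by
  have hp := List.find?_some h
  have hm := List.mem_of_find?_eq_some h
  have hne := pvGraphemes_ne_nil g hm
  simp only [Bool.and_eq_true, decide_eq_true_eq] at hp
  have h1 : 0 < g.toList.length := List.length_pos_iff.mpr hne
  have h2 : 0 < c.length := List.length_pos_iff.mpr hc
  rw [List.length_drop]; omega

-- ===== PORT A =====
-- A's recursion, on the char list (startswith "x" on lists is `isPrefixOf`; check[n:] is `drop n`;
-- the for-loop with break appends the FIRST matching grapheme then recurses: `find?`).
def find_gra_core (check : List Char) : List String :=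
  let check1 := if ['\''].isPrefixOf check ∨ ['’'].isPrefixOf check then check.drop 1 else check
  if hlen : check1.length < 1 then []
  else
    match hfind : pvGraphemes.find? (fun g => decide (g.toList.length ≤ check1.length) && g.toList.isPrefixOf check1) with
    | none => []
    | some g => g :: find_gra_core (check1.drop g.toList.length)
termination_by check.length
decreasing_by
  have hc1 : check1.length ≤ check.length := by
    simp only [check1]; split <;> simp
  have hcne : check1 ≠ [] := by
    intro h; rw [h] at hlen; simp at hlen
  have h3 := pv_find_decrease hfind hcne
  show (check1.drop g.toList.length).length < check.length
  omega

def find_gra (check : String) : List String := find_gra_core check.toList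

-- ===== PORT B =====
-- B's inner for-loop: scan `graphemes` for the first match, returning it with the shortened check
def find_gra_scan (gs : List String) (c : List Char) : Option (String × List Char) :=
  match gs with
  | [] => none
  | g :: rest =>
      if g.toList.isPrefixOf c then some (g, c.drop g.toList.length)
      else find_gra_scan rest c

theorem pv_scan_decrease {gs : List String} {g : String} {c rest : List Char}
    (hgs : ∀ x ∈ gs, x.toList ≠ []) (h : find_gra_scan gs c = some (g, rest)) :
    rest.length < c.length := by
  induction gs with
  | nil => simp [find_gra_scan] at h
  | cons a as ih =>
      by_cases hpre : a.toList.isPrefixOf c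
      · simp only [find_gra_scan, hpre, if_pos] at h
        obtain ⟨hg, hrest⟩ := Prod.mk.injEq .. ▸ Option.some.injEq .. ▸ h
        have hle : a.toList.length ≤ c.length :=
          (List.isPrefixOf_iff_prefix.mp hpre).length_le
        have hane : a.toList ≠ [] := hgs a List.mem_cons_self
        have hpos : 0 < a.toList.length := List.length_pos_iff.mpr hane
        subst hrest
        rw [List.length_drop]; omega
      · simp only [find_gra_scan, hpre, if_neg, Bool.false_eq_true, not_false_iff] at h
        exact ih (fun x hx => hgs x (List.mem_cons_of_mem _ hx)) h

-- B's while-True loop with the accumulator `lgra`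
def find_gra_loop (c : List Char) (acc : List String) : List String :=
  let c1 := if ['\''].isPrefixOf c ∨ ['’'].isPrefixOf c then c.drop 1 else c
  if c1 = [] then acc.reverse
  else
    match hscan : find_gra_scan pvGraphemes c1 with
    | none => acc.reverse
    | some (g, rest) => find_gra_loop rest (g :: acc)
termination_by c.length
decreasing_by
  have hc1 : c1.length ≤ c.length := by simp only [c1]; split <;> simp
  have := pv_scan_decrease pvGraphemes_ne_nil hscan
  omega

def find_gra_alt (check : String) : List String := find_gra_loop check.toList []

-- ===== PRECONDITION & SPEC =====
def Spec_find_gra (check : String) (out : List String) : Prop := out = find_gra_alt check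
instance (check : String) (out : List String) : Decidable (Spec_find_gra check out) := by unfold Spec_find_gra; infer_instance

-- ===== CLAIM (what is proved, stated in full; the proofs are below) =====
def Claim_equal_find_gra : Prop := ∀ (check : String), Dom_find_gra check → Spec_find_gra check (find_gra check)

-- ===== LEMMAS AND PROOFS =====

-- B's scan is A's for-loop: `find?` of the first match, paired with the shortened check
theorem scan_eq_find (gs : List String) (c : List Char) :
    find_gra_scan gs c =
      (gs.find? (fun g => decide (g.toList.length ≤ c.length) && g.toList.isPrefixOf c)).map
        (fun g => (g, c.drop g.toList.length)) := by
  induction gs with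
  | nil => simp [find_gra_scan]
  | cons a as ih =>
      by_cases hpre : a.toList.isPrefixOf c
      · have hle : a.toList.length ≤ c.length :=
          (List.isPrefixOf_iff_prefix.mp hpre).length_le
        have hle' : a.length ≤ c.length := by simpa using hle
        simp [find_gra_scan, hpre, hle']
      · simp [find_gra_scan, hpre, ih]

-- loop invariant: B's accumulator loop computes A's recursion
theorem loop_eq_core (n : Nat) : ∀ (c : List Char), c.length ≤ n → ∀ (acc : List String),
    find_gra_loop c acc = acc.reverse ++ find_gra_core c := by
  induction n with
  | zero =>
      intro c hc acc
      have : c = [] := List.length_eq_zero_iff.mp (Nat.le_zero.mp hc)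
      subst this
      rw [find_gra_loop.eq_def, find_gra_core.eq_def]
      simp [find_gra_scan]
  | succ n ih =>
      intro c hc acc
      rw [find_gra_loop.eq_def, find_gra_core.eq_def]
      by_cases h0 : (if ['\''].isPrefixOf c ∨ ['’'].isPrefixOf c then c.drop 1 else c) = []
      · have hlt : (if ['\''].isPrefixOf c ∨ ['’'].isPrefixOf c then c.drop 1 else c).length < 1 := by
          rw [h0]; simp
        rw [if_pos h0, dif_pos hlt]; simp
      · have hlt : ¬ (if ['\''].isPrefixOf c ∨ ['’'].isPrefixOf c then c.drop 1 else c).length < 1 := by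
          simpa [Nat.lt_one_iff, List.length_eq_zero_iff] using h0
        rw [if_neg h0, dif_neg hlt]
        have hc1 : (if ['\''].isPrefixOf c ∨ ['’'].isPrefixOf c then c.drop 1 else c).length ≤ c.length := by
          split <;> simp
        split
        next hscan =>
          split
          next hfind => simp
          next g' hfind =>
            rw [scan_eq_find, hfind] at hscan
            cases hscan
        next g rest hscan =>
          split
          next hfind =>
            rw [scan_eq_find, hfind] at hscan
            cases hscan
          next g' hfind =>
            rw [scan_eq_find, hfind] at hscan
            simp only [Option.map_some, Option.some.injEq, Prod.mk.injEq] at hscan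
            obtain ⟨hg, hrest⟩ := hscan
            subst hg; subst hrest
            have hdec := pv_find_decrease hfind h0
            rw [ih _ (by omega)]
            simp

-- ===== VERDICT (by name: the statement is the Claim_ definition above) =====
theorem find_gra_spec : Claim_equal_find_gra := by
  intro check _
  unfold Spec_find_gra find_gra find_gra_alt
  rw [loop_eq_core check.toList.length check.toList le_rfl]
  simp
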